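-- pv_equiv track=rewrite | github.com/ComplicateCc/translationOpt | Scripts/IniFileHandler.py | init_translation_datas_by_keylength
-- ===== SOURCE A (Python) =====
-- def init_translation_datas_by_keylength(translation_data):
--     translation_data_by_numbers = {}
--     key_length_list = []
--     # 按照 translation_data key 的字数进行分类，将整个数据结构添加到 translation_data_by_numbers 中
--     for key, value in translation_data.items():
--         key_length = len(key)
--         if key_length not in translation_data_by_numbers:
--             translation_data_by_numbers[key_length] = {}
--             key_length_list.append(key_length)
--         translation_data_by_numbers[key_length][key] = value
--     return translation_data_by_numbers, key_length_list
-- ===== SOURCE B (Python) =====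
-- def init_translation_datas_by_keylength(translation_data):
--     # Two-pass grouping: dedup the key lengths first (first-appearance order),
--     # then build each length's bucket with a filtered dict comprehension.
--     key_length_list = list(dict.fromkeys(len(key) for key in translation_data))
--     translation_data_by_numbers = {
--         n: {key: value for key, value in translation_data.items() if len(key) == n}
--         for n in key_length_list
--     }
--     return translation_data_by_numbers, key_length_list
-- ===== Notes on version B (the rewrite author's own statement) =====
-- stated objective: alternative
-- what changed: Replaces the single-pass loop with an inline not-in branch and list tracking by a two-pass scheme: dedup the key lengths first (dict.fromkeys), then build each length's bucket with a filtered dict comprehension.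
import Mathlib
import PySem

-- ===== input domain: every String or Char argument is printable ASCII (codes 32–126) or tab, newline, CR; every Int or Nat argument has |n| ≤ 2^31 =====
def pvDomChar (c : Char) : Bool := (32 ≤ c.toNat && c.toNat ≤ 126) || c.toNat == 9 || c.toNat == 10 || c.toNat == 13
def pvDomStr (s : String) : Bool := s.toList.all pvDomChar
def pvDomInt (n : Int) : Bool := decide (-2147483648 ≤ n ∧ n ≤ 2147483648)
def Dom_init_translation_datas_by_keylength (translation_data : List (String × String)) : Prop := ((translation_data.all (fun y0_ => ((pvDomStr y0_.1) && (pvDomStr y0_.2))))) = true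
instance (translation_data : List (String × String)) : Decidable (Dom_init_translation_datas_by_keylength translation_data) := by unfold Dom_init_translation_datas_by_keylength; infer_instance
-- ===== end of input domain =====

-- B groups in two passes (dedup the key lengths, then one filtered bucket per length) instead of
-- A's single loop with an inline not-in branch; same results, a different decomposition.

-- ===== PORT A =====
-- loop body of A: classify one (key, value) pair by len(key); the branch mirrors
-- A's `if key_length not in translation_data_by_numbers`, then `d[key_length][key] = value`
def pvStepA (st : PySem.Dict Int (PySem.Dict String String) × List Int) (kv : String × String) :
    PySem.Dict Int (PySem.Dict String String) × List Int :=
  if st.1.contains (PySem.Str.len kv.1) then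
    (st.1.insert (PySem.Str.len kv.1)
      ((st.1.getD (PySem.Str.len kv.1) PySem.Dict.empty).insert kv.1 kv.2), st.2)
  else
    ((st.1.insert (PySem.Str.len kv.1) PySem.Dict.empty).insert (PySem.Str.len kv.1)
      (((st.1.insert (PySem.Str.len kv.1) PySem.Dict.empty).getD (PySem.Str.len kv.1)
          PySem.Dict.empty).insert kv.1 kv.2),
     st.2 ++ [PySem.Str.len kv.1])

def init_translation_datas_by_keylength (translation_data : List (String × String)) :
    (List (Int × List (String × String))) × List Int :=
  ((translation_data.foldl pvStepA (PySem.Dict.empty, [])).1.items.map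
      (fun p => (p.1, p.2.items)),
   (translation_data.foldl pvStepA (PySem.Dict.empty, [])).2)

-- ===== PORT B =====
def init_translation_datas_by_keylength_alt (translation_data : List (String × String)) :
    (List (Int × List (String × String))) × List Int :=
  ((PySem.List.dedup (translation_data.map (fun kv => PySem.Str.len kv.1))).map (fun n =>
      (n, (PySem.Dict.ofList
            (translation_data.filter (fun kv => PySem.Str.len kv.1 == n))).items)),
   PySem.List.dedup (translation_data.map (fun kv => PySem.Str.len kv.1)))

-- ===== PRECONDITION & SPEC =====
def Spec_init_translation_datas_by_keylength (translation_data : List (String × String)) (out : (List (Int × List (String × String))) × List Int) : Prop := out = init_translation_datas_by_keylength_alt translation_data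
instance (translation_data : List (String × String)) (out : (List (Int × List (String × String))) × List Int) : Decidable (Spec_init_translation_datas_by_keylength translation_data out) := by unfold Spec_init_translation_datas_by_keylength; infer_instance

-- ===== CLAIM (what is proved, stated in full; the proofs are below) =====
def Claim_equal_init_translation_datas_by_keylength : Prop := ∀ (translation_data : List (String × String)), Dom_init_translation_datas_by_keylength translation_data → Spec_init_translation_datas_by_keylength translation_data (init_translation_datas_by_keylength translation_data)

-- ===== LEMMAS AND PROOFS =====

-- Invariant of A's loop: the tracked list is the outer dict's keys; the keys are
-- Set.update of the incoming keys by the key lengths (and stay Nodup); and each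
-- bucket is the insert-fold of the pairs of that length.
theorem pv_loopA (td : List (String × String))
    (d : PySem.Dict Int (PySem.Dict String String)) (hnd : d.keys.Nodup) :
    (td.foldl pvStepA (d, d.keys)).2 = (td.foldl pvStepA (d, d.keys)).1.keys ∧
    (td.foldl pvStepA (d, d.keys)).1.keys
      = PySem.Set.update d.keys (td.map (fun p => PySem.Str.len p.1)) ∧
    (td.foldl pvStepA (d, d.keys)).1.keys.Nodup ∧
    ∀ n, (td.foldl pvStepA (d, d.keys)).1.getD n PySem.Dict.empty
      = (td.filter (fun p => PySem.Str.len p.1 == n)).foldl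
          (fun dd p => dd.insert p.1 p.2) (d.getD n PySem.Dict.empty) := by
  induction td generalizing d with
  | nil => exact ⟨rfl, rfl, hnd, fun n => rfl⟩
  | cons kv rest ih =>
    rw [List.foldl_cons]
    dsimp only [pvStepA]
    by_cases hc : d.contains (PySem.Str.len kv.1) = true
    · -- length already present: the dict keeps its keys, only the bucket grows
      rw [if_pos hc]
      have hkeys : (d.insert (PySem.Str.len kv.1)
          ((d.getD (PySem.Str.len kv.1) PySem.Dict.empty).insert kv.1 kv.2)).keys = d.keys :=
        PySem.Dict.keys_insert_of_contains d _ hc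
      have hmem : (PySem.Str.len kv.1) ∈ d.keys :=
        (PySem.Dict.contains_iff_mem_keys d _).1 hc
      obtain ⟨h1, h2, h3, h4⟩ := ih (d.insert (PySem.Str.len kv.1)
        ((d.getD (PySem.Str.len kv.1) PySem.Dict.empty).insert kv.1 kv.2)) (by rw [hkeys]; exact hnd)
      rw [hkeys] at h1 h2 h3 h4
      refine ⟨h1, ?_, h3, ?_⟩
      · rw [h2, List.map_cons]
        have hstepu : PySem.Set.update d.keys
            ((PySem.Str.len kv.1) :: rest.map (fun p => PySem.Str.len p.1))
            = PySem.Set.update (PySem.Set.add d.keys (PySem.Str.len kv.1))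
                (rest.map (fun p => PySem.Str.len p.1)) := rfl
        have hadd : PySem.Set.add d.keys (PySem.Str.len kv.1) = d.keys := by
          simp only [PySem.Set.add]
          rw [if_pos (show PySem.Set.contains d.keys (PySem.Str.len kv.1) = true from by
            simpa [PySem.Set.contains] using hmem)]
        rw [hstepu, hadd]
      · intro n
        rw [h4 n, PySem.Dict.getD_insert, List.filter_cons]
        by_cases hn : n = PySem.Str.len kv.1
        · subst hn
          simp
        · have hb : ¬ ((PySem.Str.len kv.1 == n) = true) := by
            simp only [beq_iff_eq]
            exact fun h => hn h.symm
          rw [if_neg hn, if_neg hb]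
    · -- new length: a fresh empty bucket is appended and the length recorded
      rw [if_neg hc]
      have hcf : d.contains (PySem.Str.len kv.1) = false := by simpa using hc
      rw [PySem.Dict.getD_insert_self d (PySem.Str.len kv.1) PySem.Dict.empty PySem.Dict.empty,
          PySem.Dict.insert_insert_self]
      have hnmem : (PySem.Str.len kv.1) ∉ d.keys := by
        intro h; exact hc ((PySem.Dict.contains_iff_mem_keys d _).2 h)
      have hkeys : (d.insert (PySem.Str.len kv.1) (PySem.Dict.empty.insert kv.1 kv.2)).keys
          = d.keys ++ [PySem.Str.len kv.1] :=
        PySem.Dict.keys_insert_of_not_contains d _ hcf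
      have hnd' : (d.insert (PySem.Str.len kv.1) (PySem.Dict.empty.insert kv.1 kv.2)).keys.Nodup :=
        PySem.Dict.nodup_keys_insert d _ _ hnd
      obtain ⟨h1, h2, h3, h4⟩ := ih (d.insert (PySem.Str.len kv.1)
        (PySem.Dict.empty.insert kv.1 kv.2)) hnd'
      rw [hkeys] at h1 h2 h3 h4
      refine ⟨h1, ?_, h3, ?_⟩
      · rw [h2, List.map_cons]
        have hstepu : PySem.Set.update d.keys
            ((PySem.Str.len kv.1) :: rest.map (fun p => PySem.Str.len p.1))
            = PySem.Set.update (PySem.Set.add d.keys (PySem.Str.len kv.1))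
                (rest.map (fun p => PySem.Str.len p.1)) := rfl
        have hadd : PySem.Set.add d.keys (PySem.Str.len kv.1) = d.keys ++ [PySem.Str.len kv.1] := by
          simp only [PySem.Set.add]
          rw [if_neg (show ¬ PySem.Set.contains d.keys (PySem.Str.len kv.1) = true from by
            simpa [PySem.Set.contains] using hnmem)]
        rw [hstepu, hadd]
      · intro n
        rw [h4 n, PySem.Dict.getD_insert, List.filter_cons]
        by_cases hn : n = PySem.Str.len kv.1
        · subst hn
          rw [if_pos rfl,
              PySem.Dict.getD_of_not_contains d PySem.Dict.empty hcf]
          simp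
        · have hb : ¬ ((PySem.Str.len kv.1 == n) = true) := by
            simp only [beq_iff_eq]
            exact fun h => hn h.symm
          rw [if_neg hn, if_neg hb]

theorem pv_ofList_foldl (pairs : List (String × String)) :
    PySem.Dict.ofList pairs
      = pairs.foldl (fun dd p => dd.insert p.1 p.2) PySem.Dict.empty := rfl

-- ===== VERDICT (by name: the statement is the Claim_ definition above) =====
theorem init_translation_datas_by_keylength_spec : Claim_equal_init_translation_datas_by_keylength := by
  intro td _
  unfold Spec_init_translation_datas_by_keylength
  unfold init_translation_datas_by_keylength init_translation_datas_by_keylength_alt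
  rw [show ([] : List Int)
      = (PySem.Dict.empty : PySem.Dict Int (PySem.Dict String String)).keys from rfl]
  obtain ⟨h1, h2, h3, h4⟩ := pv_loopA td PySem.Dict.empty (@PySem.Dict.nodup_keys_empty Int (PySem.Dict String String))
  have hlen : (td.foldl pvStepA (PySem.Dict.empty, (PySem.Dict.empty : PySem.Dict Int (PySem.Dict String String)).keys)).1.keys
      = PySem.List.dedup (td.map (fun kv => PySem.Str.len kv.1)) := by
    rw [h2]
    simp only [PySem.List.dedup_eq_ofList]
    rfl
  have hitems : (td.foldl pvStepA (PySem.Dict.empty, (PySem.Dict.empty : PySem.Dict Int (PySem.Dict String String)).keys)).1.items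
      = (td.foldl pvStepA (PySem.Dict.empty, (PySem.Dict.empty : PySem.Dict Int (PySem.Dict String String)).keys)).1.keys.map
          (fun n => (n, (td.foldl pvStepA (PySem.Dict.empty, (PySem.Dict.empty : PySem.Dict Int (PySem.Dict String String)).keys)).1.getD n
            PySem.Dict.empty)) :=
    PySem.Dict.items_eq_map_keys _ h3 _
  refine Prod.ext ?_ ?_
  · rw [hitems, List.map_map, hlen]
    refine List.map_congr_left (fun n _ => ?_)
    simp only [Function.comp_apply]
    rw [h4 n, pv_ofList_foldl, PySem.Dict.getD_empty]
  · rw [h1, hlen]
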